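-- pv_equiv track=rewrite | github.com/consul-k/Stepik | Functional programming in Python/step03/3.03/3.3.02.py | translate_to_robber_lang
-- ===== SOURCE A (Python) =====
-- def translate_to_robber_lang(text):
--     new_text = ''
--     consonants = 'bcdfghjklmnpqrstvwxyzBCDFGHJKLMNPQRSTVWXYZ'
--     for i in text:
--         if i in consonants:
--             new_text += i + 'o' + i
--         else:
--             new_text += i
--     return new_text
-- ===== SOURCE B (Python) =====
-- def translate_to_robber_lang(text):
--     # staged passes: one global replace per consonant; passes are independent
--     # because a pass only inserts the consonant itself and the vowel 'o'
--     for c in 'bcdfghjklmnpqrstvwxyzBCDFGHJKLMNPQRSTVWXYZ':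
--         text = text.replace(c, c + 'o' + c)
--     return text
-- ===== Notes on version B (the rewrite author's own statement) =====
-- stated objective: alternative
-- what changed: A makes one pass over the text, testing each character against the consonant string and appending; B instead loops over the 42 consonants and performs one global str.replace pass per consonant, so the control flow iterates over the alphabet rather than over the text and no per-character branch or membership test exists.
import Mathlib
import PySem

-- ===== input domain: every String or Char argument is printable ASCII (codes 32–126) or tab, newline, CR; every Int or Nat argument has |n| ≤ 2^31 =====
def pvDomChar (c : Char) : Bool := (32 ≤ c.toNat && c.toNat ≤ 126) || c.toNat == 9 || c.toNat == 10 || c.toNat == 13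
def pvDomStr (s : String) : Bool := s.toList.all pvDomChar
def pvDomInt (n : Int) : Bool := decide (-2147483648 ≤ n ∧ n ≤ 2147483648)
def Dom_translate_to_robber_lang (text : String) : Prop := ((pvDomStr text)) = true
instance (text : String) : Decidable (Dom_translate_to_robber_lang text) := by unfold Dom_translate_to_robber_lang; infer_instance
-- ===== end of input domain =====

-- B replaces A's single per-character pass (membership test + append) by 42 staged
-- whole-string replace passes, one per consonant (objective: alternative).

-- ===== PORT A =====
-- A's consonants string, as its character list
def pvConsonants : List Char := "bcdfghjklmnpqrstvwxyzBCDFGHJKLMNPQRSTVWXYZ".toList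

-- literal port of A: accumulate new_text character by character (string concat as char-list concat)
def translate_to_robber_lang (text : String) : String :=
  String.ofList (text.toList.foldl
    (fun acc i => if pvConsonants.contains i then acc ++ [i, 'o', i] else acc ++ [i]) [])

-- ===== PORT B =====
-- port of B: for each consonant c, one global pass text = text.replace(c, c+'o'+c)
def translate_to_robber_lang_alt (text : String) : String :=
  pvConsonants.foldl
    (fun t c => PySem.Str.replace t (String.ofList [c]) (String.ofList [c, 'o', c])) text

-- ===== PRECONDITION & SPEC =====
def Spec_translate_to_robber_lang (text : String) (out : String) : Prop := out = translate_to_robber_lang_alt text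
instance (text : String) (out : String) : Decidable (Spec_translate_to_robber_lang text out) := by unfold Spec_translate_to_robber_lang; infer_instance

-- ===== CLAIM (what is proved, stated in full; the proofs are below) =====
def Claim_equal_translate_to_robber_lang : Prop := ∀ (text : String), Dom_translate_to_robber_lang text → Spec_translate_to_robber_lang text (translate_to_robber_lang text)

-- ===== LEMMAS AND PROOFS =====

-- expansion of a text by the set P of consonants already processed
def pvExpand (P : List Char) (l : List Char) : List Char :=
  l.flatMap (fun x => if x ∈ P then [x, 'o', x] else [x])

-- single-character replace is the pointwise flatMap
theorem pv_replace_go (c : Char) (new : List Char) :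
    ∀ (fuel : Nat) (l acc : List Char), l.length ≤ fuel →
      PySem.Chars.replace.go [c] new fuel l acc
        = acc.reverse ++ l.flatMap (fun x => if x = c then new else [x]) := by
  intro fuel
  induction fuel with
  | zero =>
    intro l acc h
    have : l = [] := List.eq_nil_of_length_eq_zero (Nat.le_zero.mp h)
    subst this; simp [PySem.Chars.replace.go]
  | succ n ih =>
    intro l acc h
    cases l with
    | nil => simp [PySem.Chars.replace.go]
    | cons x t =>
      simp only [PySem.Chars.replace.go]
      by_cases hx : x = c
      · subst hx
        have hpre : List.isPrefixOf [x] (x :: t) = true := by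
          simp [List.isPrefixOf]
        rw [if_pos hpre]
        have ht : t.length ≤ n := by simpa using h
        rw [show List.drop (List.length [x]) (x :: t) = t by simp]
        rw [ih t (new.reverse ++ acc) ht]
        simp
      · have hpre : List.isPrefixOf [c] (x :: t) = false := by
          simp [List.isPrefixOf]; exact fun hcx => (hx hcx.symm).elim
        rw [if_neg (by simp [hpre])]
        have ht : t.length ≤ n := by simpa using h
        rw [ih t (x :: acc) ht]
        simp [hx]

theorem pv_replace_single (c : Char) (new l : List Char) :
    PySem.Chars.replace l [c] new
      = l.flatMap (fun x => if x = c then new else [x]) := by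
  unfold PySem.Chars.replace
  simpa using pv_replace_go c new l.length l [] (le_refl _)

-- one replace pass on an expanded text extends the processed set by one consonant
theorem pv_pass (done : List Char) (c : Char) (hcd : c ∉ done) (hco : c ≠ 'o')
    (l : List Char) :
    PySem.Chars.replace (pvExpand done l) [c] [c, 'o', c]
      = pvExpand (done ++ [c]) l := by
  rw [pv_replace_single]
  unfold pvExpand
  rw [List.flatMap_assoc]
  apply List.flatMap_congr
  intro x _
  by_cases hx : x ∈ done
  · have hxc : x ≠ c := fun h => hcd (h ▸ hx)
    simp [hx, hxc, hco.symm]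
  · by_cases hxc : x = c
    · subst hxc; simp [hx]
    · simp [hx, hxc]

-- folding the replace passes over a consonant suffix completes the expansion
theorem pv_fold (l : List Char) :
    ∀ (rest done : List Char), (∀ c ∈ rest, c ∉ done) → (∀ c ∈ rest, c ≠ 'o') →
      rest.Nodup →
      rest.foldl (fun t c => PySem.Chars.replace t [c] [c, 'o', c]) (pvExpand done l)
        = pvExpand (done ++ rest) l := by
  intro rest
  induction rest with
  | nil => intro done _ _ _; simp
  | cons c tl ih =>
    intro done hd ho hnd
    simp only [List.foldl_cons]
    rw [pv_pass done c (hd c (by simp)) (ho c (by simp)) l]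
    rw [ih (done ++ [c])
        (fun x hx => by
          simp only [List.mem_append, List.mem_singleton]
          rintro (h | h)
          · exact hd x (by simp [hx]) h
          · exact (List.nodup_cons.mp hnd).1 (h ▸ hx))
        (fun x hx => ho x (by simp [hx]))
        (List.nodup_cons.mp hnd).2]
    simp

-- A's accumulator loop computes the full expansion
theorem pv_A_expand (l : List Char) :
    l.foldl (fun acc i => if pvConsonants.contains i then acc ++ [i, 'o', i] else acc ++ [i]) []
      = pvExpand pvConsonants l := by
  unfold pvExpand
  rw [show (fun (acc : List Char) i =>
        if pvConsonants.contains i then acc ++ [i, 'o', i] else acc ++ [i])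
      = fun acc i => acc ++ (if i ∈ pvConsonants then [i, 'o', i] else [i])
    from funext fun acc => funext fun i => by by_cases h : i ∈ pvConsonants <;> simp [h]]
  simpa using PySem.List.foldl_append_eq_flatMap
    (fun i => if i ∈ pvConsonants then [i, 'o', i] else [i]) l []

-- B's String-level fold, seen on character lists
theorem pv_B_toList (text : String) :
    (translate_to_robber_lang_alt text).toList
      = pvConsonants.foldl (fun t c => PySem.Chars.replace t [c] [c, 'o', c]) text.toList := by
  unfold translate_to_robber_lang_alt
  generalize pvConsonants = cs
  induction cs generalizing text with
  | nil => simp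
  | cons c tl ih =>
    simp only [List.foldl_cons]
    rw [ih (PySem.Str.replace text (String.ofList [c]) (String.ofList [c, 'o', c]))]
    rw [PySem.Str.toList_replace]
    simp [String.toList_ofList]

-- ===== VERDICT (by name: the statement is the Claim_ definition above) =====
theorem translate_to_robber_lang_spec : Claim_equal_translate_to_robber_lang := by
  intro text _
  unfold Spec_translate_to_robber_lang
  have hB := pv_B_toList text
  have ho : 'o' ∉ pvConsonants := by decide
  have hnd : pvConsonants.Nodup := by decide
  have hfold := pv_fold text.toList pvConsonants []
    (fun c _ => List.not_mem_nil) (fun c hc h => ho (h ▸ hc)) hnd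
  rw [show pvExpand [] text.toList = text.toList by unfold pvExpand; simp] at hfold
  have : (translate_to_robber_lang_alt text).toList
      = (translate_to_robber_lang text).toList := by
    rw [hB, hfold]
    unfold translate_to_robber_lang
    rw [String.toList_ofList, pv_A_expand]
    simp
  exact (String.toList_inj.mp this).symm
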